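-- pv_equiv track=rewrite | github.com/nereafernandeez/QKD_attacks | Simulacion_SARG04_THA_ENGLISH.py | states_guess
-- ===== SOURCE A (Python) =====
-- def states_guess(bases, results):
--     n = len(bases)
--     states = []
--
--     for i in range(n):
--         # If measured in Z basis and result is 0, the state should be |0>
--         if(bases[i] == "Z" and results[i] == 0):
--             states.append("0")
--         # If measured in Z basis and result is 1, the state should be |1>
--         elif(bases[i] == "Z" and results[i] == 1):
--             states.append("1")
--         # If measured in X basis and result is 0, the state should be |+>
--         elif(bases[i] == "X" and results[i] == 0):
--             states.append("+")
--         # If measured in X basis and result is 1, the state should be |->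
--         else:
--             states.append("-")
--
--     return states
-- ===== SOURCE B (Python) =====
-- RULES = (("Z", 0, "0"), ("Z", 1, "1"), ("X", 0, "+"))
--
--
-- def states_guess(bases, results):
--     n = len(bases)
--     states = ["-"] * n
--     for basis, result, label in RULES:
--         for i in range(n):
--             if bases[i] == basis and results[i] == result:
--                 states[i] = label
--     return states
-- ===== Notes on version B (the rewrite author's own statement) =====
-- stated objective: alternative
-- what changed: Instead of one index-major pass through a branch ladder appending labels, B pre-fills a '-' array of length n and then makes three rule-major overwrite passes, one per (basis,result,label) rule, assigning the label at every matching index; this is correct because the three rules are mutually exclusive per index. Pre_ excludes inputs where results is too short at a 'Z'/'X' position, on which both programs raise IndexError.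
import Mathlib
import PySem

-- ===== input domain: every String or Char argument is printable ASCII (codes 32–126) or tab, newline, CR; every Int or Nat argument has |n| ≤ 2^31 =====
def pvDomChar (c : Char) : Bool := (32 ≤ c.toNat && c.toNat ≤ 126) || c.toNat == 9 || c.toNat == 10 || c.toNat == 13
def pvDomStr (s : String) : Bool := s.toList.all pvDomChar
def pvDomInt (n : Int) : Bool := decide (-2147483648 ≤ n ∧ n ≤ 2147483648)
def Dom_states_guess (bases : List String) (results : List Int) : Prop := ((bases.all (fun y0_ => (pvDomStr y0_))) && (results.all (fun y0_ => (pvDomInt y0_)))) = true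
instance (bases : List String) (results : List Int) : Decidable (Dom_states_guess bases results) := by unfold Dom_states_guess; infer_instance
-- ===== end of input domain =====

-- B replaces A's single index-major branch-ladder pass by a default '-' array plus three rule-major overwrite passes (alternative decomposition, same O(n) cost); Pre_ excludes inputs where both Pythons raise IndexError.


-- ===== PORT A =====
def states_guess (bases : List String) (results : List Int) : List String :=
  (PySem.List.pyRange 0 (bases.length : Int) 1).foldl (fun states i =>
    if PySem.List.pyGetD bases i "" == "Z" && PySem.List.pyGetD results i 0 == 0 then
      states ++ ["0"]
    else if PySem.List.pyGetD bases i "" == "Z" && PySem.List.pyGetD results i 0 == 1 then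
      states ++ ["1"]
    else if PySem.List.pyGetD bases i "" == "X" && PySem.List.pyGetD results i 0 == 0 then
      states ++ ["+"]
    else
      states ++ ["-"]) []

-- ===== PORT B =====
def pvRules : List (String × Int × String) := [("Z", 0, "0"), ("Z", 1, "1"), ("X", 0, "+")]

def states_guess_alt (bases : List String) (results : List Int) : List String :=
  pvRules.foldl (fun states rule =>
    (PySem.List.pyRange 0 (bases.length : Int) 1).foldl (fun states i =>
      if PySem.List.pyGetD bases i "" == rule.1 && PySem.List.pyGetD results i 0 == rule.2.1 then
        PySem.List.pySetD states i rule.2.2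
      else states) states)
    (List.replicate bases.length "-")

-- ===== PRECONDITION & SPEC =====
-- Pre_ excludes exactly the inputs on which Python A raises IndexError: those where results has no
-- entry at some index whose basis is "Z" or "X" (at any other basis A never reads results there).
def Pre_states_guess (bases : List String) (results : List Int) : Prop :=
  ∀ i < bases.length, (bases.getD i "" = "Z" ∨ bases.getD i "" = "X") → i < results.length
instance (bases : List String) (results : List Int) : Decidable (Pre_states_guess bases results) := by unfold Pre_states_guess; infer_instance

def pvWitness_states_guess : List String × List Int := (["Z", "X", "Y"], [0, 1])

def Spec_states_guess (bases : List String) (results : List Int) (out : List String) : Prop := out = states_guess_alt bases results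
instance (bases : List String) (results : List Int) (out : List String) : Decidable (Spec_states_guess bases results out) := by unfold Spec_states_guess; infer_instance

-- ===== CLAIM (what is proved, stated in full; the proofs are below) =====
def Claim_equal_states_guess : Prop := ∀ (bases : List String) (results : List Int), Dom_states_guess bases results → Pre_states_guess bases results → Spec_states_guess bases results (states_guess bases results)

-- ===== LEMMAS AND PROOFS =====

-- the per-index label A computes
def pvLabel (b : String) (r : Int) : String :=
  if b == "Z" && r == 0 then "0"
  else if b == "Z" && r == 1 then "1"
  else if b == "X" && r == 0 then "+"
  else "-"

lemma states_guess_eq_map (bases : List String) (results : List Int) :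
    states_guess bases results =
      (PySem.List.pyRange 0 (bases.length : Int) 1).map
        (fun i => pvLabel (PySem.List.pyGetD bases i "") (PySem.List.pyGetD results i 0)) := by
  unfold states_guess
  have hb : (fun (states : List String) (i : Int) =>
      if PySem.List.pyGetD bases i "" == "Z" && PySem.List.pyGetD results i 0 == 0 then
        states ++ ["0"]
      else if PySem.List.pyGetD bases i "" == "Z" && PySem.List.pyGetD results i 0 == 1 then
        states ++ ["1"]
      else if PySem.List.pyGetD bases i "" == "X" && PySem.List.pyGetD results i 0 == 0 then
        states ++ ["+"]
      else
        states ++ ["-"]) =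
      (fun states i =>
        states ++ [pvLabel (PySem.List.pyGetD bases i "") (PySem.List.pyGetD results i 0)]) := by
    funext states i
    unfold pvLabel
    split_ifs <;> rfl
  rw [hb, PySem.List.foldl_append_singleton_eq_map]
  simp

-- one rule pass of B preserves the length of the state list
lemma pvPass_length (cond : Int → Bool) (lab : String) (l : List Int) :
    ∀ (s : List String),
      (l.foldl (fun s i => if cond i then PySem.List.pySetD s i lab else s) s).length = s.length := by
  induction l with
  | nil => intro s; rfl
  | cons x xs ih =>
      intro s
      simp only [List.foldl_cons]
      by_cases h : cond x = true
      · rw [if_pos h, ih, PySem.List.length_pySetD]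
      · rw [if_neg h, ih]

-- the k-th entry after one rule pass of B over range(n)
lemma pvPass_getD (cond : Int → Bool) (lab d : String) :
    ∀ (n : ℕ) (s : List String) (k : ℕ),
      ((PySem.List.pyRange 0 (n : Int) 1).foldl
        (fun s i => if cond i then PySem.List.pySetD s i lab else s) s).getD k d
      = if k < n ∧ k < s.length ∧ cond k then lab else s.getD k d := by
  intro n
  induction n with
  | zero =>
      intro s k
      rw [PySem.List.pyRange_one_eq_nil (by omega)]
      simp
  | succ n ih =>
      intro s k
      have hsplit : PySem.List.pyRange 0 ((n + 1 : ℕ) : Int) 1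
          = PySem.List.pyRange 0 (n : Int) 1 ++ [(n : Int)] := by
        have hcast : ((n + 1 : ℕ) : Int) = (n : Int) + 1 := by push_cast; ring
        rw [hcast, PySem.List.pyRange_one_succ_right (by omega)]
      rw [hsplit, List.foldl_append]
      simp only [List.foldl_cons, List.foldl_nil]
      set prev := (PySem.List.pyRange 0 (n : Int) 1).foldl
        (fun s i => if cond i then PySem.List.pySetD s i lab else s) s with hprev
      have hlen : prev.length = s.length := pvPass_length cond lab _ s
      by_cases hc : cond (n : Int) = true
      · rw [if_pos hc, PySem.List.pySetD_natCast]
        by_cases hk : k = n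
        · subst hk
          by_cases hks : k < s.length
          · have h1 : (prev.set k lab).getD k d = lab := by
              have hkp : k < prev.length := by rw [hlen]; exact hks
              simp [List.getD_eq_getElem?_getD, hkp]
            rw [h1, if_pos ⟨Nat.lt_succ_self k, hks, hc⟩]
          · have hkp : prev.length ≤ k := by rw [hlen]; omega
            rw [List.getD_eq_default _ _ (by rw [List.length_set]; exact hkp)]
            simp only [hks, and_false, false_and, if_false]
            rw [List.getD_eq_default _ _ (by omega)]
        · have h1 : (prev.set n lab).getD k d = prev.getD k d := by
            simp [List.getD_eq_getElem?_getD, (show n ≠ k by omega)]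
          rw [h1, ih]
          have h2 : (k < n + 1 ∧ k < s.length ∧ cond ↑k = true)
              ↔ (k < n ∧ k < s.length ∧ cond ↑k = true) := by
            constructor <;> rintro ⟨ha, hb, hcc⟩ <;> exact ⟨by omega, hb, hcc⟩
          rw [if_congr h2 rfl rfl]
      · rw [if_neg hc, ih]
        by_cases hk : k = n
        · subst hk
          simp [hc]
        · have h2 : (k < n + 1 ∧ k < s.length ∧ cond ↑k = true)
              ↔ (k < n ∧ k < s.length ∧ cond ↑k = true) := by
            constructor <;> rintro ⟨ha, hb, hcc⟩ <;> exact ⟨by omega, hb, hcc⟩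
          rw [if_congr h2 rfl rfl]

-- the nested ifs B's three passes produce at one index agree with A's branch ladder
lemma pvPasses_eq_label (b : String) (r : Int) :
    (if b == "X" && r == 0 then "+"
     else if b == "Z" && r == 1 then "1"
     else if b == "Z" && r == 0 then "0" else "-") = pvLabel b r := by
  unfold pvLabel
  by_cases hbZ : b = "Z" <;> by_cases hbX : b = "X" <;>
    by_cases hr0 : r = 0 <;> by_cases hr1 : r = 1 <;> simp_all

-- ===== VERDICT (by name: the statement is the Claim_ definition above) =====
theorem states_guess_spec : Claim_equal_states_guess := by
  intro bases results _hdom _hpre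
  unfold Spec_states_guess states_guess_alt pvRules
  simp only [List.foldl_cons, List.foldl_nil]
  rw [states_guess_eq_map]
  apply List.ext_getElem
  · rw [List.length_map, PySem.List.length_pyRange_one,
      pvPass_length, pvPass_length, pvPass_length, List.length_replicate]
    omega
  · intro k hk hk'
    have hkn : k < bases.length := by
      simpa [PySem.List.length_pyRange_one] using hk
    have hlen2 : ((PySem.List.pyRange 0 (bases.length : Int) 1).foldl
        (fun states i => if PySem.List.pyGetD bases i "" == "Z" && PySem.List.pyGetD results i 0 == 1
          then PySem.List.pySetD states i "1" else states)
        ((PySem.List.pyRange 0 (bases.length : Int) 1).foldl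
          (fun states i => if PySem.List.pyGetD bases i "" == "Z" && PySem.List.pyGetD results i 0 == 0
            then PySem.List.pySetD states i "0" else states)
          (List.replicate bases.length "-"))).length = bases.length := by
      rw [pvPass_length, pvPass_length, List.length_replicate]
    rw [← List.getD_eq_getElem _ "?" hk']
    rw [pvPass_getD, pvPass_getD, pvPass_getD]
    simp only [List.getElem_map, PySem.List.getElem_pyRange_one, zero_add,
      List.length_replicate, pvPass_length, hkn, true_and]
    rw [List.getD_replicate]
    exact (pvPasses_eq_label _ _).symm
    exact hkn
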